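-- pv_equiv track=rewrite | github.com/kissjasz/rain-gauge-maintenance | main.py | _tokenize_args
-- ===== SOURCE A (Python) =====
-- def _tokenize_args(s):
--     """Optimized tokenizer with better performance"""
--     if not s:
--         return []
--
--     args = []
--     cur = []
--     state = None
--     brace_depth = 0
--     escape = False
--
--     for i, c in enumerate(s):
--         if escape:
--             cur.append(c)
--             escape = False
--             continue
--
--         if c == '\\':
--             escape = True
--             cur.append(c)
--             continue
--
--         if state is None:
--             if c in "\"'":
--                 state = c
--                 cur.append(c)
--             elif c == '{':
--                 state = '{'
--                 brace_depth = 1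
--                 cur.append(c)
--             elif c == ',':
--                 token = ''.join(cur).strip()
--                 if token:
--                     args.append(token)
--                 cur = []
--             else:
--                 cur.append(c)
--         elif state in ("'", '"'):
--             cur.append(c)
--             if c == state:
--                 state = None
--         else:  # state == '{'
--             cur.append(c)
--             if c == '{':
--                 brace_depth += 1
--             elif c == '}':
--                 brace_depth -= 1
--                 if brace_depth == 0:
--                     state = None
--
--     token = ''.join(cur).strip()
--     if token:
--         args.append(token)
--     return args
-- ===== SOURCE B (Python) =====
-- def _tokenize_args(s):
--     args = []
--     cur = []
--     i = 0
--     n = len(s)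
--     while i < n:
--         c = s[i]
--         if c == '\\':
--             cur.append(c)
--             i += 1
--             if i < n:
--                 cur.append(s[i])
--                 i += 1
--         elif c == ',':
--             token = ''.join(cur).strip()
--             if token:
--                 args.append(token)
--             cur = []
--             i += 1
--         elif c == '"' or c == "'":
--             cur.append(c)
--             i += 1
--             while i < n:
--                 d = s[i]
--                 if d == '\\':
--                     cur.append(d)
--                     i += 1
--                     if i < n:
--                         cur.append(s[i])
--                         i += 1
--                     continue
--                 cur.append(d)
--                 i += 1
--                 if d == c:
--                     break
--         elif c == '{':
--             cur.append(c)
--             depth = 1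
--             i += 1
--             while i < n:
--                 d = s[i]
--                 if d == '\\':
--                     cur.append(d)
--                     i += 1
--                     if i < n:
--                         cur.append(s[i])
--                         i += 1
--                     continue
--                 cur.append(d)
--                 i += 1
--                 if d == '{':
--                     depth += 1
--                 elif d == '}':
--                     depth -= 1
--                     if depth == 0:
--                         break
--         else:
--             cur.append(c)
--             i += 1
--     token = ''.join(cur).strip()
--     if token:
--         args.append(token)
--     return args
-- ===== Notes on version B (the rewrite author's own statement) =====
-- stated objective: alternative
-- what changed: Replaced A's single flat per-character loop with a boolean escape flag, an Optional state char and a brace counter by an index-based scanner whose quoted and braced spans are consumed by dedicated nested inner loops (escape handled locally by consuming two characters at once).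
import Mathlib
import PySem

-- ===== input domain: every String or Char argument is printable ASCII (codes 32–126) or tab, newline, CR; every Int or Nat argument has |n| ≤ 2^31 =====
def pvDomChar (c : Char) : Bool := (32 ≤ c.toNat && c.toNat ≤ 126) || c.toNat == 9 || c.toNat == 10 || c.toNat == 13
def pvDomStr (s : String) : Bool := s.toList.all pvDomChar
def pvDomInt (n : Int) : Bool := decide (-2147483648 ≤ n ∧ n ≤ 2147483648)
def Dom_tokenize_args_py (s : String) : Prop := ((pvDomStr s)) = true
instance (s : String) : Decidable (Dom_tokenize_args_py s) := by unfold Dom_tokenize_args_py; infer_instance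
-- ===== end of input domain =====

set_option maxHeartbeats 1000000


-- B replaces A's flat per-character state-flag machine by an index-free scanner with
-- nested span-consuming loops for quoted and braced spans (objective: alternative decomposition).

-- ===== PORT A =====
-- state of A's loop: (args, cur, state, brace_depth, escape)
def pvStepA (acc : List String × List Char × Option Char × Int × Bool) (c : Char) :
    List String × List Char × Option Char × Int × Bool :=
  let (args, cur, state, bd, escape) := acc
  if escape then (args, cur ++ [c], state, bd, false)
  else if c = '\\' then (args, cur ++ [c], state, bd, true)
  else
    match state with
    | none =>
      if c = '"' ∨ c = '\'' then (args, cur ++ [c], some c, bd, false)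
      else if c = '{' then (args, cur ++ [c], some '{', 1, false)
      else if c = ',' then
        let token := PySem.Str.strip (String.mk cur)
        ((if token ≠ "" then args ++ [token] else args), [], none, bd, false)
      else (args, cur ++ [c], none, bd, false)
    | some q =>
      if q = '\'' ∨ q = '"' then
        if c = q then (args, cur ++ [c], none, bd, false)
        else (args, cur ++ [c], some q, bd, false)
      else  -- state == '{'
        if c = '{' then (args, cur ++ [c], some q, bd + 1, false)
        else if c = '}' then
          if bd - 1 = 0 then (args, cur ++ [c], none, bd - 1, false)
          else (args, cur ++ [c], some q, bd - 1, false)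
        else (args, cur ++ [c], some q, bd, false)

-- final '' .join(cur).strip(); if token: args.append(token)
def pvFinishA (acc : List String × List Char × Option Char × Int × Bool) : List String :=
  let token := PySem.Str.strip (String.mk acc.2.1)
  if token ≠ "" then acc.1 ++ [token] else acc.1

-- the enumerate index i is never used by A, so the fold is over the characters alone
def tokenize_args_py (s : String) : List String :=
  if s = "" then []
  else pvFinishA (s.toList.foldl pvStepA ([], [], none, 0, false))

-- ===== PORT B =====
mutual
-- top-level scan: only ',', quotes, '{' and '\' are special
def pvScanTop : List Char → List Char → List String → List String
  | [], cur, args =>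
      let token := PySem.Str.strip (String.mk cur)
      if token ≠ "" then args ++ [token] else args
  | c :: rest, cur, args =>
      if c = '\\' then
        match rest with
        | [] => pvScanTop [] (cur ++ [c]) args
        | d :: rest' => pvScanTop rest' (cur ++ [c, d]) args
      else if c = ',' then
        let token := PySem.Str.strip (String.mk cur)
        pvScanTop rest [] (if token ≠ "" then args ++ [token] else args)
      else if c = '"' ∨ c = '\'' then pvScanQuote c rest (cur ++ [c]) args
      else if c = '{' then pvScanBrace 1 rest (cur ++ [c]) args
      else pvScanTop rest (cur ++ [c]) args
termination_by l _ _ => l.length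
decreasing_by all_goals simp
-- inner loop: copy chars (escape-aware) until the matching quote
def pvScanQuote (q : Char) : List Char → List Char → List String → List String
  | [], cur, args =>
      let token := PySem.Str.strip (String.mk cur)
      if token ≠ "" then args ++ [token] else args
  | c :: rest, cur, args =>
      if c = '\\' then
        match rest with
        | [] => pvScanQuote q [] (cur ++ [c]) args
        | d :: rest' => pvScanQuote q rest' (cur ++ [c, d]) args
      else if c = q then pvScanTop rest (cur ++ [c]) args
      else pvScanQuote q rest (cur ++ [c]) args
termination_by l _ _ => l.length
decreasing_by all_goals simp
-- inner loop: copy chars (escape-aware) tracking brace depth until it hits zero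
def pvScanBrace (depth : Int) : List Char → List Char → List String → List String
  | [], cur, args =>
      let token := PySem.Str.strip (String.mk cur)
      if token ≠ "" then args ++ [token] else args
  | c :: rest, cur, args =>
      if c = '\\' then
        match rest with
        | [] => pvScanBrace depth [] (cur ++ [c]) args
        | d :: rest' => pvScanBrace depth rest' (cur ++ [c, d]) args
      else if c = '{' then pvScanBrace (depth + 1) rest (cur ++ [c]) args
      else if c = '}' then
        if depth - 1 = 0 then pvScanTop rest (cur ++ [c]) args
        else pvScanBrace (depth - 1) rest (cur ++ [c]) args
      else pvScanBrace depth rest (cur ++ [c]) args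
termination_by l _ _ => l.length
decreasing_by all_goals simp
end

def tokenize_args_py_alt (s : String) : List String := pvScanTop s.toList [] []

-- ===== PRECONDITION & SPEC =====
def Spec_tokenize_args_py (s : String) (out : List String) : Prop := out = tokenize_args_py_alt s
instance (s : String) (out : List String) : Decidable (Spec_tokenize_args_py s out) := by unfold Spec_tokenize_args_py; infer_instance

-- ===== CLAIM (what is proved, stated in full; the proofs are below) =====
def Claim_equal_tokenize_args_py : Prop := ∀ (s : String), Dom_tokenize_args_py s → Spec_tokenize_args_py s (tokenize_args_py s)

-- ===== LEMMAS AND PROOFS =====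

theorem pv_main (n : Nat) : ∀ cs : List Char, cs.length ≤ n →
    (∀ cur args bd, pvFinishA (cs.foldl pvStepA (args, cur, none, bd, false)) = pvScanTop cs cur args) ∧
    (∀ q, (q = '"' ∨ q = '\'') → ∀ cur args bd,
      pvFinishA (cs.foldl pvStepA (args, cur, some q, bd, false)) = pvScanQuote q cs cur args) ∧
    (∀ bd cur args, pvFinishA (cs.foldl pvStepA (args, cur, some '{', bd, false)) = pvScanBrace bd cs cur args) := by
  induction n with
  | zero =>
    intro cs hcs
    have : cs = [] := List.eq_nil_of_length_eq_zero (Nat.le_zero.mp hcs)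
    subst this
    refine ⟨?_, ?_, ?_⟩ <;> intros <;> simp [pvScanTop, pvScanQuote, pvScanBrace, pvFinishA]
  | succ n ih =>
    intro cs hcs
    match cs with
    | [] =>
      refine ⟨?_, ?_, ?_⟩ <;> intros <;> simp [pvScanTop, pvScanQuote, pvScanBrace, pvFinishA]
    | c :: rest =>
      have hrest : rest.length ≤ n := by simpa using hcs
      refine ⟨?_, ?_, ?_⟩
      · -- top level
        intro cur args bd
        by_cases hb : c = '\\'
        · subst hb
          match rest with
          | [] => simp [pvScanTop, pvFinishA, pvStepA]
          | d :: rest' =>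
            have h2 : rest'.length ≤ n := by simp at hrest; omega
            simp only [List.foldl_cons, pvStepA, pvScanTop]
            rw [← (ih rest' h2).1 (cur ++ ['\\', d]) args bd]
            simp
        · by_cases hq : c = '"' ∨ c = '\''
          · simp only [List.foldl_cons, pvStepA, if_neg hb, hq, if_true]
            rw [pvScanTop.eq_def]; dsimp only; rw [if_neg hb]
            have hc : ¬ c = ',' := by rcases hq with h | h <;> subst h <;> decide
            rw [if_neg hc, if_pos hq, ← (ih rest hrest).2.1 c hq (cur ++ [c]) args bd]
            simp
          · by_cases hbr : c = '{'
            · subst hbr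
              simp only [List.foldl_cons, pvStepA]
              rw [pvScanTop.eq_def]; dsimp only
              norm_num
              rw [← (ih rest hrest).2.2 1 (cur ++ ['{']) args]
              simp
            · by_cases hcm : c = ','
              · subst hcm
                simp only [List.foldl_cons, pvStepA]
                rw [pvScanTop.eq_def]; dsimp only
                norm_num
                rw [← (ih rest hrest).1 [] _ bd]
                simp
              · simp only [List.foldl_cons, pvStepA, if_neg hb, if_neg hq, if_neg hbr,
                  if_neg hcm]
                rw [pvScanTop.eq_def]; dsimp only; rw [if_neg hb, if_neg hcm, if_neg hq, if_neg hbr,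
                  ← (ih rest hrest).1 (cur ++ [c]) args bd]
                simp
      · -- inside quotes
        intro q hq cur args bd
        have hq' : q = '\'' ∨ q = '"' := hq.symm
        by_cases hb : c = '\\'
        · subst hb
          match rest with
          | [] => simp [pvScanQuote, pvFinishA, pvStepA, hq']
          | d :: rest' =>
            have h2 : rest'.length ≤ n := by simp at hrest; omega
            simp only [List.foldl_cons, pvStepA, hq', if_true, pvScanQuote]
            rw [← (ih rest' h2).2.1 q hq (cur ++ ['\\', d]) args bd]
            simp
        · by_cases hc : c = q
          · subst hc
            simp only [List.foldl_cons, pvStepA, if_neg hb, hq', if_pos rfl]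
            rw [pvScanQuote.eq_def]; dsimp only; rw [if_neg hb, if_pos rfl, ← (ih rest hrest).1 (cur ++ [c]) args bd]
            simp
          · simp only [List.foldl_cons, pvStepA, if_neg hb, hq', if_neg hc]
            rw [pvScanQuote.eq_def]; dsimp only; rw [if_neg hb, if_neg hc, ← (ih rest hrest).2.1 q hq (cur ++ [c]) args bd]
            simp
      · -- inside braces
        intro bd cur args
        have hnq : ¬ ('{' = '\'' ∨ '{' = '"') := by decide
        by_cases hb : c = '\\'
        · subst hb
          match rest with
          | [] => simp [pvScanBrace, pvFinishA, pvStepA]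
          | d :: rest' =>
            have h2 : rest'.length ≤ n := by simp at hrest; omega
            simp only [List.foldl_cons, pvStepA, if_neg hnq, pvScanBrace]
            rw [← (ih rest' h2).2.2 bd (cur ++ ['\\', d]) args]
            simp
        · by_cases ho : c = '{'
          · subst ho
            simp only [List.foldl_cons, pvStepA, if_neg hnq]
            rw [pvScanBrace.eq_def]; dsimp only
            norm_num
            rw [← (ih rest hrest).2.2 (bd + 1) (cur ++ ['{']) args]
            simp
          · by_cases hcl : c = '}'
            · subst hcl
              by_cases hz : bd - 1 = 0
              · simp only [List.foldl_cons, pvStepA, if_neg hnq, if_pos hz]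
                rw [pvScanBrace.eq_def]; dsimp only
                norm_num [hz]
                rw [← (ih rest hrest).1 (cur ++ ['}']) args (bd - 1)]
                simp [hz]
              · simp only [List.foldl_cons, pvStepA, if_neg hnq, if_neg hz]
                rw [pvScanBrace.eq_def]; dsimp only
                norm_num [hz]
                rw [← (ih rest hrest).2.2 (bd - 1) (cur ++ ['}']) args]
                simp
            · simp only [List.foldl_cons, pvStepA, if_neg hnq, if_neg hb, if_neg ho, if_neg hcl]
              rw [pvScanBrace.eq_def]; dsimp only; rw [if_neg hb, if_neg ho, if_neg hcl,
                ← (ih rest hrest).2.2 bd (cur ++ [c]) args]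
              simp

-- ===== VERDICT (by name: the statement is the Claim_ definition above) =====
theorem tokenize_args_py_spec : Claim_equal_tokenize_args_py := by
  intro s _
  unfold Spec_tokenize_args_py tokenize_args_py tokenize_args_py_alt
  by_cases h : s = ""
  · subst h; simp [pvScanTop]; decide
  · simp only [h, if_false]
    exact (pv_main s.toList.length s.toList le_rfl).1 [] [] 0
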